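-- pv_equiv track=rewrite | github.com/zetayue/ProMoNet | dataset/dataset_scpdb.py | extract_fasta_chain
-- ===== SOURCE A (Python) =====
-- def extract_fasta_chain(fasta_data, chain):
--     sequences = fasta_data.strip().split('>')
--
--     for seq in sequences:
--         if seq:
--             header, sequence = seq.split('\n', 1)
--             if f"|Chain" in header and f"auth {chain}" in header:
--                 return f"{sequence}"
--
--     for seq in sequences:
--         if seq:
--             header, sequence = seq.split('\n', 1)
--             if (f"Chain {chain}" in header) or (f"|Chains " in header and f" {chain}," in header) or (f", {chain}|" in header):
--                 return f"{sequence}"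
--     return f"Chain {chain} not found in the given FASTA data."
-- ===== SOURCE B (Python) =====
-- def extract_fasta_chain(fasta_data, chain):
--     fallback = None
--     for rec in fasta_data.strip().split('>'):
--         if not rec:
--             continue
--         header, sequence = rec.split('\n', 1)
--         if "|Chain" in header and f"auth {chain}" in header:
--             return sequence
--         if fallback is None and (f"Chain {chain}" in header
--                                  or ("|Chains " in header and f" {chain}," in header)
--                                  or f", {chain}|" in header):
--             fallback = sequence
--     if fallback is not None:
--         return fallback
--     return f"Chain {chain} not found in the given FASTA data."
-- ===== Notes on version B (the rewrite author's own statement) =====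
-- stated objective: simpler
-- what changed: A's two full scans (re-splitting every record twice) are replaced by a single pass that returns a primary match immediately and remembers the first secondary match as a fallback.
import Mathlib
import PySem

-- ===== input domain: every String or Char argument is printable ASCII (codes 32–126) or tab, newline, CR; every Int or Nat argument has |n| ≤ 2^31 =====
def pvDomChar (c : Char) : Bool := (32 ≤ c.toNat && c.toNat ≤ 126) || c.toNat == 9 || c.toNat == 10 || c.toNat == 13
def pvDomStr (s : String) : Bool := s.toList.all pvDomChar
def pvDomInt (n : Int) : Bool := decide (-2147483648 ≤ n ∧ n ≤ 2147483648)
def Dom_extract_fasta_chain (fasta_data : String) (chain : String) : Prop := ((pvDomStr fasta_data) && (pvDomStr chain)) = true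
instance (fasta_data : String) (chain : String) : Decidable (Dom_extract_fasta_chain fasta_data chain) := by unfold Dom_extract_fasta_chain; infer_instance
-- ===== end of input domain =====

-- B replaces A's two scans over the FASTA records by ONE pass that returns a primary
-- (`|Chain … auth X`) match immediately and remembers the first secondary match as a
-- fallback — objective: simpler (one traversal, one parse of each record).


-- shared record parsing (both Pythons do `header, sequence = seq.split('\n', 1)`)
-- none = the unpack raises ValueError (no '\n' in the record)
def pvSplitRec (r : List Char) : Option (List Char × List Char) :=
  match PySem.Chars.splitOnMax r ['\n'] 1 with
  | [h, s] => some (h, s)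
  | _ => none

-- `"|Chain" in header and f"auth {chain}" in header`
def pvPrimary (ch h : List Char) : Bool :=
  PySem.Chars.isIn "|Chain".toList h && PySem.Chars.isIn ("auth ".toList ++ ch) h

-- `(f"Chain {chain}" in header) or (f"|Chains " in header and f" {chain}," in header) or (f", {chain}|" in header)`
def pvSecondary (ch h : List Char) : Bool :=
  PySem.Chars.isIn ("Chain ".toList ++ ch) h ||
  (PySem.Chars.isIn "|Chains ".toList h && PySem.Chars.isIn (' ' :: (ch ++ [','])) h) ||
  PySem.Chars.isIn (',' :: ' ' :: (ch ++ ['|'])) h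

def pvNotFound (ch : List Char) : String :=
  String.ofList ("Chain ".toList ++ ch ++ " not found in the given FASTA data.".toList)

-- ===== PORT A =====
-- first loop of A: first primary match; `none` at a malformed record = the ValueError
-- (those inputs are excluded by Pre_)
def pvPass1 (ch : List Char) : List (List Char) → Option (List Char)
  | [] => none
  | r :: rs =>
    if r = [] then pvPass1 ch rs
    else
      match pvSplitRec r with
      | none => none  -- Python raises ValueError here; excluded by Pre_
      | some (h, s) => if pvPrimary ch h then some s else pvPass1 ch rs

-- second loop of A: first secondary match
def pvPass2 (ch : List Char) : List (List Char) → Option (List Char)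
  | [] => none
  | r :: rs =>
    if r = [] then pvPass2 ch rs
    else
      match pvSplitRec r with
      | none => none  -- Python raises ValueError here; excluded by Pre_
      | some (h, s) => if pvSecondary ch h then some s else pvPass2 ch rs

def extract_fasta_chain (fasta_data : String) (chain : String) : String :=
  let sequences := PySem.Chars.splitOn (PySem.Chars.strip fasta_data.toList) ['>']
  let ch := chain.toList
  match pvPass1 ch sequences with
  | some s => String.ofList s
  | none =>
    match pvPass2 ch sequences with
    | some s => String.ofList s
    | none => pvNotFound ch

-- ===== PORT B =====
-- B's single pass: return a primary match at once, remember the first secondary match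
def pvScan (ch : List Char) : Option (List Char) → List (List Char) → String
  | fb, [] =>
    match fb with
    | some s => String.ofList s
    | none => pvNotFound ch
  | fb, r :: rs =>
    if r = [] then pvScan ch fb rs
    else
      match pvSplitRec r with
      | none => pvScan ch fb rs  -- Python raises ValueError here; excluded by Pre_
      | some (h, s) =>
        if pvPrimary ch h then String.ofList s
        else if fb.isNone && pvSecondary ch h then pvScan ch (some s) rs
        else pvScan ch fb rs

def extract_fasta_chain_alt (fasta_data : String) (chain : String) : String :=
  pvScan chain.toList none (PySem.Chars.splitOn (PySem.Chars.strip fasta_data.toList) ['>'])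

-- ===== PRECONDITION & SPEC =====
-- a nonempty '>'-record whose split('\n', 1) yields no (header, sequence) pair — on it the unpack raises ValueError
def pvMalformed (r : List Char) : Bool := !r.isEmpty && (pvSplitRec r).isNone

-- the record parses and its header satisfies the primary condition
def pvPrimRec (ch r : List Char) : Bool :=
  match pvSplitRec r with
  | some (h, _) => pvPrimary ch h
  | none => false

-- "no malformed record before every primary match": malformed records make both Pythons
-- raise ValueError unless a primary-matching record precedes them (then A/B return before reaching them)
def pvP (ch : List Char) (recs : List (List Char)) : Prop :=
  ∀ i, i < recs.length → pvMalformed (recs.getD i []) = true →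
    ∃ j, j < i ∧ pvPrimRec ch (recs.getD j []) = true

-- Pre_ excludes exactly the inputs on which Python A raises ValueError: a newline-less
-- nonempty '>'-record not preceded by a primary-matching record.
def Pre_extract_fasta_chain (fasta_data : String) (chain : String) : Prop :=
  pvP chain.toList (PySem.Chars.splitOn (PySem.Chars.strip fasta_data.toList) ['>'])

instance (fasta_data : String) (chain : String) : Decidable (Pre_extract_fasta_chain fasta_data chain) := by
  unfold Pre_extract_fasta_chain pvP; infer_instance

def pvWitness_extract_fasta_chain : String × String := (">sp|Chain A, auth A\nMKV", "A")

def Spec_extract_fasta_chain (fasta_data : String) (chain : String) (out : String) : Prop := out = extract_fasta_chain_alt fasta_data chain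
instance (fasta_data : String) (chain : String) (out : String) : Decidable (Spec_extract_fasta_chain fasta_data chain out) := by unfold Spec_extract_fasta_chain; infer_instance

-- ===== CLAIM (what is proved, stated in full; the proofs are below) =====
def Claim_equal_extract_fasta_chain : Prop := ∀ (fasta_data : String) (chain : String), Dom_extract_fasta_chain fasta_data chain → Pre_extract_fasta_chain fasta_data chain → Spec_extract_fasta_chain fasta_data chain (extract_fasta_chain fasta_data chain)

-- ===== LEMMAS AND PROOFS =====
theorem pvP_head {ch : List Char} {r : List Char} {rs : List (List Char)}
    (h : pvP ch (r :: rs)) : pvMalformed r = false := by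
  by_cases hm : pvMalformed r = true
  · obtain ⟨j, hj, _⟩ := h 0 (by simp) (by simpa using hm)
    omega
  · simpa using hm

theorem pvP_tail {ch : List Char} {r : List Char} {rs : List (List Char)}
    (hr : pvPrimRec ch r = false) (h : pvP ch (r :: rs)) : pvP ch rs := by
  intro i hi hm
  obtain ⟨j, hj, hp⟩ := h (i + 1) (by simpa using Nat.succ_lt_succ hi) (by simpa using hm)
  cases j with
  | zero => simp [hr] at hp
  | succ k => exact ⟨k, by omega, by simpa using hp⟩

theorem pvScan_eq (ch : List Char) (recs : List (List Char)) :
    ∀ fb : Option (List Char), pvP ch recs →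
    pvScan ch fb recs =
      (match pvPass1 ch recs with
       | some s => String.ofList s
       | none =>
         match fb with
         | some s => String.ofList s
         | none =>
           match pvPass2 ch recs with
           | some s => String.ofList s
           | none => pvNotFound ch) := by
  induction recs with
  | nil => intro fb _; simp [pvScan, pvPass1, pvPass2]
  | cons r rs ih =>
    intro fb hP
    have hm0 : pvMalformed r = false := pvP_head hP
    by_cases hre : r = []
    · subst hre
      have hprim : pvPrimRec ch [] = false := rfl
      simpa [pvScan, pvPass1, pvPass2] using ih fb (pvP_tail hprim hP)
    · match hsp : pvSplitRec r with
      | none =>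
        exfalso
        have : pvMalformed r = true := by
          simp [pvMalformed, hsp, hre]
        simp [this] at hm0
      | some (h, s) =>
        by_cases hp : pvPrimary ch h = true
        · simp [pvScan, pvPass1, hre, hsp, hp]
        · have hpf : pvPrimary ch h = false := by simpa using hp
          have hprim : pvPrimRec ch r = false := by simp [pvPrimRec, hsp, hpf]
          have hPrs := pvP_tail hprim hP
          have h1 : pvPass1 ch (r :: rs) = pvPass1 ch rs := by
            simp [pvPass1, hre, hsp, hpf]
          cases fb with
          | some t =>
            have hL : pvScan ch (some t) (r :: rs) = pvScan ch (some t) rs := by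
              simp [pvScan, hre, hsp, hpf]
            rw [hL, ih (some t) hPrs, h1]
          | none =>
            by_cases hs2 : pvSecondary ch h = true
            · have hL : pvScan ch none (r :: rs) = pvScan ch (some s) rs := by
                simp [pvScan, hre, hsp, hpf, hs2]
              have h2 : pvPass2 ch (r :: rs) = some s := by
                simp [pvPass2, hre, hsp, hs2]
              rw [hL, ih (some s) hPrs, h1, h2]

            · have hsf : pvSecondary ch h = false := by simpa using hs2
              have hL : pvScan ch none (r :: rs) = pvScan ch none rs := by
                simp [pvScan, hre, hsp, hpf, hsf]
              have h2 : pvPass2 ch (r :: rs) = pvPass2 ch rs := by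
                simp [pvPass2, hre, hsp, hsf]
              rw [hL, ih none hPrs, h1, h2]

-- ===== VERDICT (by name: the statement is the Claim_ definition above) =====
theorem extract_fasta_chain_spec : Claim_equal_extract_fasta_chain := by
  intro fasta_data chain _ hPre
  unfold Spec_extract_fasta_chain extract_fasta_chain extract_fasta_chain_alt
  unfold Pre_extract_fasta_chain at hPre
  rw [pvScan_eq _ _ none hPre]
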